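-- pv_equiv track=rewrite | github.com/anton-dovzhenko/coding-competitions-python | leetcode/_2012_Sum_of_Beauty_in_the_Array.py | sumOfBeauties
-- ===== SOURCE A (Python) =====
-- def sumOfBeauties(nums):
--     num_max = [nums[0]] * len(nums)
--     for i in range(1, len(nums)):
--         num_max[i] = (max(num_max[i - 1], nums[i]))
--
--     s = 0
--     min_tail = nums[-1]
--     for i in range(len(nums) - 2, 0, -1):
--         if num_max[i - 1] < nums[i] < min_tail:
--             s += 2
--         elif nums[i - 1] < nums[i] < nums[i + 1]:
--             s += 1
--         min_tail = min(min_tail, nums[i])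
--
--     return s
-- ===== SOURCE B (Python) =====
-- def sumOfBeauties(nums):
--     s = 0
--     for i in range(1, len(nums) - 1):
--         if all(x < nums[i] for x in nums[:i]) and all(nums[i] < x for x in nums[i + 1:]):
--             s += 2
--         elif nums[i - 1] < nums[i] < nums[i + 1]:
--             s += 1
--     return s
-- ===== Notes on version B (the rewrite author's own statement) =====
-- stated objective: alternative
-- what changed: A's O(n) fused backward scan (prefix-max table plus a running suffix-min variable) is replaced by a direct per-index definition: for each interior i, scan the whole prefix and the whole suffix with all() to decide beauty 2, a brute-force O(n^2) algorithm with no precomputed tables or running state.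
-- crash fix: On the empty list A raises IndexError (nums[-1]); B returns 0 since there are no interior indices. — e.g. on sumOfBeauties([]): A raises IndexError, B returns 0
import Mathlib
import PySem

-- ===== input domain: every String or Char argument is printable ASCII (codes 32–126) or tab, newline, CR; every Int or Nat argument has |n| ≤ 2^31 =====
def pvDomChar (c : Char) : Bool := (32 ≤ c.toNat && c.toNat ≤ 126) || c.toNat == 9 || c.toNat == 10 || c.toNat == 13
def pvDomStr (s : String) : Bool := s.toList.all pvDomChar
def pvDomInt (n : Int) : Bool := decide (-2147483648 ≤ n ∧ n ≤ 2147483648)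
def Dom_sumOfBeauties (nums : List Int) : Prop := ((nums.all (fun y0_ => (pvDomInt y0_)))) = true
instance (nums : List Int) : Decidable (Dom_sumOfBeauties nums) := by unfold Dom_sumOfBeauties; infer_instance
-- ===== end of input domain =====

-- B replaces A's fused backward scan (prefix-max table + running suffix min) by a brute-force
-- per-index definition that re-scans the whole prefix and suffix for each interior index;
-- objective: alternative (direct from the definition, no tables or running state; O(n^2), not faster).

-- ===== PORT A =====
-- the forward "num_max[i] = max(num_max[i-1], nums[i])" loop as the structural recursion on the same running maximum
def pvA_maxGo (prev : Int) : List Int → List Int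
  | [] => []
  | x :: xs => (max prev x) :: pvA_maxGo (max prev x) xs

-- loop body of A's backward scan: state (s, min_tail), index i
def pvA_step (nums numMax : List Int) (st : Int × Int) (i : Int) : Int × Int :=
  let s :=
    if PySem.List.pyGetD numMax (i - 1) 0 < PySem.List.pyGetD nums i 0 ∧
        PySem.List.pyGetD nums i 0 < st.2 then st.1 + 2
    else if PySem.List.pyGetD nums (i - 1) 0 < PySem.List.pyGetD nums i 0 ∧
        PySem.List.pyGetD nums i 0 < PySem.List.pyGetD nums (i + 1) 0 then st.1 + 1
    else st.1
  (s, min st.2 (PySem.List.pyGetD nums i 0))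

def sumOfBeauties (nums : List Int) : Int :=
  match nums with
  | [] => 0   -- Python raises IndexError reading the first element; excluded by Pre_sumOfBeauties
  | x :: rest =>
    let numMax := x :: pvA_maxGo x rest
    ((PySem.List.pyRange ((nums.length : Int) - 2) 0 (-1)).foldl
        (pvA_step nums numMax) (0, PySem.List.pyGetD nums (-1) 0)).1

-- ===== PORT B =====
-- loop body of B's forward pass: all(x < nums[i] for x in nums[:i]) / all(nums[i] < x for x in nums[i+1:])
def pvB_add (nums : List Int) (s : Int) (i : Int) : Int :=
  let v := PySem.List.pyGetD nums i 0
  if (PySem.List.slice nums none (some i)).all (fun x => decide (x < v)) ∧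
      (PySem.List.slice nums (some (i + 1)) none).all (fun x => decide (v < x)) then s + 2
  else if PySem.List.pyGetD nums (i - 1) 0 < v ∧ v < PySem.List.pyGetD nums (i + 1) 0 then s + 1
  else s

def sumOfBeauties_alt (nums : List Int) : Int :=
  (PySem.List.pyRange 1 ((nums.length : Int) - 1) 1).foldl (pvB_add nums) 0

-- ===== PRECONDITION & SPEC =====
-- A reads the last element unconditionally, so it raises IndexError exactly on the empty list.
def Pre_sumOfBeauties (nums : List Int) : Prop := nums ≠ []
instance (nums : List Int) : Decidable (Pre_sumOfBeauties nums) := by unfold Pre_sumOfBeauties; infer_instance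
def pvWitness_sumOfBeauties : List Int := [1, 2, 3]

-- On the empty list A raises IndexError while B returns 0 (there are no interior indices).
def Raises_sumOfBeauties (nums : List Int) : Prop := nums = []
instance (nums : List Int) : Decidable (Raises_sumOfBeauties nums) := by unfold Raises_sumOfBeauties; infer_instance
def pvRaiseWitness_sumOfBeauties : List Int := []
def pvRaiseWitnessOut_sumOfBeauties : Int := 0

def Spec_sumOfBeauties (nums : List Int) (out : Int) : Prop := out = sumOfBeauties_alt nums
instance (nums : List Int) (out : Int) : Decidable (Spec_sumOfBeauties nums out) := by unfold Spec_sumOfBeauties; infer_instance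

-- ===== CLAIM (what is proved, stated in full; the proofs are below) =====
def Claim_equal_sumOfBeauties : Prop := ∀ (nums : List Int), Dom_sumOfBeauties nums → Pre_sumOfBeauties nums → Spec_sumOfBeauties nums (sumOfBeauties nums)
def Claim_raises_sumOfBeauties : Prop := (∀ (nums : List Int), Dom_sumOfBeauties nums → Raises_sumOfBeauties nums → ¬ Pre_sumOfBeauties nums) ∧ (Dom_sumOfBeauties (pvRaiseWitness_sumOfBeauties) ∧ Raises_sumOfBeauties (pvRaiseWitness_sumOfBeauties) ∧ sumOfBeauties_alt (pvRaiseWitness_sumOfBeauties) = pvRaiseWitnessOut_sumOfBeauties)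

-- ===== LEMMAS AND PROOFS =====

-- proof-side tables: prefix maxima and suffix minima of nums
def pvPreGo (best : Int) : List Int → List Int
  | [] => []
  | x :: xs => (max best x) :: pvPreGo (max best x) xs

def pvPre : List Int → List Int
  | [] => []
  | x :: xs => x :: pvPreGo x xs

def pvSuf : List Int → List Int
  | [] => []
  | [x] => [x]
  | x :: y :: t => (min ((pvSuf (y :: t)).headD 0) x) :: pvSuf (y :: t)

-- A's score, in table form, and its sum over interior indices 1..k
def pvT_add (nums pre suf : List Int) (s : Int) (i : Int) : Int :=
  if PySem.List.pyGetD pre (i - 1) 0 < PySem.List.pyGetD nums i 0 ∧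
      PySem.List.pyGetD nums i 0 < PySem.List.pyGetD suf (i + 1) 0 then s + 2
  else if PySem.List.pyGetD nums (i - 1) 0 < PySem.List.pyGetD nums i 0 ∧
      PySem.List.pyGetD nums i 0 < PySem.List.pyGetD nums (i + 1) 0 then s + 1
  else s

def pvScoreSum (nums pre suf : List Int) : Nat → Int
  | 0 => 0
  | k + 1 => pvScoreSum nums pre suf k + pvT_add nums pre suf 0 ((k : Int) + 1)

lemma pvA_maxGo_eq (p : Int) (l : List Int) : pvA_maxGo p l = pvPreGo p l := by
  induction l generalizing p with
  | nil => rfl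
  | cons x xs ih => simp [pvA_maxGo, pvPreGo, ih]

lemma pvSuf_length (l : List Int) : (pvSuf l).length = l.length := by
  induction l with
  | nil => rfl
  | cons x xs ih =>
    cases xs with
    | nil => rfl
    | cons y t => simp [pvSuf] at *; omega

lemma pvSuf_rec (l : List Int) (i : Nat) (h : i + 1 < l.length) :
    (pvSuf l).getD i 0 = min ((pvSuf l).getD (i + 1) 0) (l.getD i 0) := by
  induction l generalizing i with
  | nil => simp at h
  | cons x xs ih =>
    cases xs with
    | nil => simp at h
    | cons y t =>
      cases i with
      | zero =>
        have hne : pvSuf (y :: t) ≠ [] := by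
          have := pvSuf_length (y :: t); intro hnil; rw [hnil] at this; simp at this
        cases hsuf : pvSuf (y :: t) with
        | nil => exact absurd hsuf hne
        | cons a r => simp [pvSuf, hsuf]
      | succ j =>
        have hj : j + 1 < (y :: t).length := by simp at h ⊢; omega
        simpa [pvSuf] using ih j hj

lemma pvSuf_last (l : List Int) (h : l ≠ []) :
    (pvSuf l).getD (l.length - 1) 0 = l.getD (l.length - 1) 0 := by
  induction l with
  | nil => exact absurd rfl h
  | cons x xs ih =>
    cases xs with
    | nil => rfl
    | cons y t =>
      have h1 : (x :: y :: t).length - 1 = ((y :: t).length - 1) + 1 := by simp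
      simp only [pvSuf, h1, List.getD_cons_succ]
      exact ih (by simp)

lemma pvT_add_shift (nums pre suf : List Int) (s i : Int) :
    pvT_add nums pre suf s i = s + pvT_add nums pre suf 0 i := by
  unfold pvT_add; split_ifs <;> ring

-- B's foldl in terms of the table-form score sum (pointwise agreement is proved separately)
lemma pvT_loop (nums pre suf : List Int) (k : Nat) (s : Int) :
    (PySem.List.pyRange 1 ((k : Int) + 1) 1).foldl (pvT_add nums pre suf) s
      = s + pvScoreSum nums pre suf k := by
  induction k generalizing s with
  | zero =>
    rw [show ((0 : Nat) : Int) + 1 = 1 by norm_num, PySem.List.pyRange_one_eq_nil le_rfl]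
    simp [pvScoreSum]
  | succ k ih =>
    have h1 : (1 : Int) ≤ (k : Int) + 1 := by omega
    have : ((k + 1 : Nat) : Int) + 1 = ((k : Int) + 1) + 1 := by push_cast; ring
    rw [this, PySem.List.pyRange_one_succ_right h1, List.foldl_append]
    simp only [List.foldl_cons, List.foldl_nil, ih]
    rw [pvT_add_shift]
    simp only [pvScoreSum]
    ring

lemma pvA_loop (nums pre : List Int) (k : Nat) (s : Int) (h : k + 1 < nums.length) :
    (PySem.List.pyRange (k : Int) 0 (-1)).foldl (pvA_step nums pre)
        (s, (pvSuf nums).getD (k + 1) 0)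
      = (s + pvScoreSum nums pre (pvSuf nums) k, (pvSuf nums).getD 1 0) := by
  induction k generalizing s with
  | zero =>
    rw [show ((0 : Nat) : Int) = 0 by norm_num, PySem.List.pyRange_neg_one_eq_nil le_rfl]
    simp [pvScoreSum]
  | succ k ih =>
    rw [PySem.List.pyRange_neg_one_cons (by exact_mod_cast Nat.succ_pos k)]
    have hc : ((k + 1 : Nat) : Int) - 1 = (k : Int) := by push_cast; ring
    simp only [List.foldl_cons, hc]
    have hstep : pvA_step nums pre ((s, (pvSuf nums).getD (k + 1 + 1) 0)) ((k + 1 : Nat) : Int)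
        = (pvT_add nums pre (pvSuf nums) s ((k + 1 : Nat) : Int), (pvSuf nums).getD (k + 1) 0) := by
      unfold pvA_step pvT_add
      have e1 : ((k + 1 : Nat) : Int) - 1 = ((k : Nat) : Int) := by push_cast; ring
      have e2 : ((k + 1 : Nat) : Int) + 1 = ((k + 2 : Nat) : Int) := by push_cast; ring
      rw [e1, e2]
      simp only [PySem.List.pyGetD_natCast]
      rw [pvSuf_rec nums (k + 1) (by omega)]
    rw [hstep, ih _ (by omega)]
    rw [pvT_add_shift]
    have hc1 : ((k + 1 : Nat) : Int) = (k : Int) + 1 := by push_cast; ring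
    simp only [pvScoreSum, hc1, Prod.mk.injEq]
    exact ⟨by ring, trivial⟩

lemma pyGetD_neg_one (l : List Int) (h : l ≠ []) :
    PySem.List.pyGetD l (-1) 0 = l.getD (l.length - 1) 0 := by
  cases l with
  | nil => exact absurd rfl h
  | cons x xs =>
    simp [PySem.List.pyGetD, PySem.List.pyGet?, PySem.List.pyIdx?]

-- prefix-max table vs. B's whole-prefix scan
lemma pvPreGo_lt (w : Int) (l : List Int) (j : Nat) (p : Int) (h : j < l.length) :
    ((pvPreGo p l).getD j 0 < w ↔ p < w ∧ ∀ y ∈ l.take (j + 1), y < w) := by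
  induction l generalizing p j with
  | nil => simp at h
  | cons x xs ih =>
    cases j with
    | zero =>
      simp only [pvPreGo, List.getD_cons_zero, List.take_succ_cons, List.take_zero,
        List.mem_cons, List.not_mem_nil, or_false, forall_eq, max_lt_iff]
    | succ j =>
      have hj : j < xs.length := by simp at h; omega
      simp only [pvPreGo, List.getD_cons_succ, List.take_succ_cons]
      rw [ih j (max p x) hj]
      simp only [List.mem_cons]
      constructor
      · rintro ⟨hm, hall⟩
        exact ⟨by omega, fun y hy => hy.elim (fun e => by omega) (hall y)⟩
      · rintro ⟨hp, hall⟩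
        exact ⟨by have := hall x (Or.inl rfl); omega, fun y hy => hall y (Or.inr hy)⟩

lemma pvPre_lt (w : Int) (l : List Int) (j : Nat) (h : j < l.length) :
    ((pvPre l).getD j 0 < w ↔ ∀ y ∈ l.take (j + 1), y < w) := by
  cases l with
  | nil => simp at h
  | cons x xs =>
    cases j with
    | zero => simp [pvPre]
    | succ j =>
      have hj : j < xs.length := by simp at h; omega
      simp only [pvPre, List.getD_cons_succ, List.take_succ_cons]
      rw [pvPreGo_lt w xs j x hj]
      simp only [List.mem_cons]
      constructor
      · rintro ⟨hx, hall⟩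
        exact fun y hy => hy.elim (fun e => by omega) (hall y)
      · intro hall
        exact ⟨hall x (Or.inl rfl), fun y hy => hall y (Or.inr hy)⟩

-- suffix-min table vs. B's whole-suffix scan
lemma pvSuf_gt (w : Int) (l : List Int) (j : Nat) (h : j < l.length) :
    (w < (pvSuf l).getD j 0 ↔ ∀ y ∈ l.drop j, w < y) := by
  induction l generalizing j with
  | nil => simp at h
  | cons x xs ih =>
    cases xs with
    | nil =>
      cases j with
      | zero => simp [pvSuf]
      | succ j => simp at h
    | cons z t =>
      cases j with
      | zero =>
        have hne : pvSuf (z :: t) ≠ [] := by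
          have := pvSuf_length (z :: t); intro hnil; rw [hnil] at this; simp at this
        cases hsuf : pvSuf (z :: t) with
        | nil => exact absurd hsuf hne
        | cons a r =>
          have h0 : (pvSuf (z :: t)).getD 0 0 = a := by rw [hsuf]; rfl
          have := ih 0 (by simp)
          rw [h0] at this
          simp only [pvSuf, hsuf, List.headD_cons, List.getD_cons_zero, List.drop_zero] at this ⊢
          constructor
          · intro hm y hy
            have hwa : w < a := lt_of_lt_of_le hm (min_le_left _ _)
            have hwx : w < x := lt_of_lt_of_le hm (min_le_right _ _)
            rcases List.mem_cons.mp hy with e | hy'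
            · omega
            · exact this.mp hwa y hy'
          · intro hall
            have hwx : w < x := hall x List.mem_cons_self
            have hwa : w < a := this.mpr (fun y hy => hall y (List.mem_cons_of_mem _ hy))
            exact lt_min hwa hwx
      | succ j =>
        have hj : j < (z :: t).length := by simp at h ⊢; omega
        simpa [pvSuf] using ih (j := j) hj

-- pointwise: B's brute-force score = the table-form score on the interior indices
lemma pvB_add_eq_table (nums : List Int) (s i : Int)
    (hi : i ∈ PySem.List.pyRange 1 ((nums.length : Int) - 1) 1) :
    pvB_add nums s i = pvT_add nums (pvPre nums) (pvSuf nums) s i := by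
  rw [PySem.List.mem_pyRange_one] at hi
  obtain ⟨h1, h2⟩ := hi
  obtain ⟨j, rfl⟩ : ∃ j : Nat, i = (j : Int) := ⟨i.toNat, (Int.toNat_of_nonneg (by omega)).symm⟩
  have hj1 : 1 ≤ j := by exact_mod_cast h1
  have hj2 : j + 1 < nums.length := by omega
  unfold pvB_add pvT_add
  have e1 : ((j : Int)) - 1 = ((j - 1 : Nat) : Int) := by push_cast [hj1]; ring
  have e2 : ((j : Int)) + 1 = ((j + 1 : Nat) : Int) := by push_cast; ring
  rw [e1, e2]
  simp only [PySem.List.pyGetD_natCast, PySem.List.slice_to_natCast,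
    PySem.List.slice_from_natCast]
  have hpre : (pvPre nums).getD (j - 1) 0 < nums.getD j 0 ↔
      ∀ y ∈ nums.take j, y < nums.getD j 0 := by
    have := pvPre_lt (nums.getD j 0) nums (j - 1) (by omega)
    rwa [Nat.sub_add_cancel hj1] at this
  have hsuf : nums.getD j 0 < (pvSuf nums).getD (j + 1) 0 ↔
      ∀ y ∈ nums.drop (j + 1), nums.getD j 0 < y :=
    pvSuf_gt (nums.getD j 0) nums (j + 1) hj2
  have hc : (((nums.take j).all fun x => decide (x < nums.getD j 0)) = true ∧
      ((nums.drop (j + 1)).all fun x => decide (nums.getD j 0 < x)) = true)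
      ↔ ((pvPre nums).getD (j - 1) 0 < nums.getD j 0 ∧
          nums.getD j 0 < (pvSuf nums).getD (j + 1) 0) := by
    rw [hpre, hsuf]
    constructor
    · rintro ⟨h1, h2⟩
      exact ⟨fun y hy => by simpa using List.all_eq_true.mp h1 y hy,
             fun y hy => by simpa using List.all_eq_true.mp h2 y hy⟩
    · rintro ⟨h1, h2⟩
      exact ⟨List.all_eq_true.mpr fun y hy => by simpa using h1 y hy,
             List.all_eq_true.mpr fun y hy => by simpa using h2 y hy⟩
  exact if_congr hc rfl rfl

-- ===== VERDICT (by name: the statement is the Claim_ definition above) =====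
theorem sumOfBeauties_spec : Claim_equal_sumOfBeauties := by
  intro nums _ hpre
  unfold Spec_sumOfBeauties
  cases nums with
  | nil => exact absurd rfl hpre
  | cons x rest =>
    cases rest with
    | nil =>
      simp [sumOfBeauties, sumOfBeauties_alt,
        PySem.List.pyRange_neg_one_eq_nil (by norm_num : (-1 : Int) ≤ 0),
        PySem.List.pyRange_one_eq_nil (by norm_num : (0 : Int) ≤ 1)]
    | cons y t =>
      have hlen : (x :: y :: t).length = t.length + 2 := by simp
      unfold sumOfBeauties sumOfBeauties_alt
      simp only [hlen]
      have e2 : ((t.length + 2 : Nat) : Int) - 2 = (t.length : Int) := by push_cast; ring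
      have e1 : ((t.length + 2 : Nat) : Int) - 1 = ((t.length : Nat) : Int) + 1 := by push_cast; ring
      rw [e2, e1]
      have hinit : PySem.List.pyGetD (x :: y :: t) (-1) 0
          = (pvSuf (x :: y :: t)).getD (t.length + 1) 0 := by
        rw [pyGetD_neg_one _ (by simp), ← pvSuf_last _ (by simp)]
        simp
      rw [hinit, pvA_maxGo_eq]
      have hpre' : (x :: pvPreGo x (y :: t)) = pvPre (x :: y :: t) := rfl
      rw [hpre']
      rw [pvA_loop _ _ t.length 0 (by simp)]
      have hfold : List.foldl (pvB_add (x :: y :: t)) 0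
            (PySem.List.pyRange 1 ((t.length : Int) + 1) 1)
          = List.foldl (pvT_add (x :: y :: t) (pvPre (x :: y :: t)) (pvSuf (x :: y :: t))) 0
            (PySem.List.pyRange 1 ((t.length : Int) + 1) 1) :=
        PySem.List.foldl_congr_mem _ _ _ _ (fun s i hi =>
          pvB_add_eq_table (x :: y :: t) s i (by rw [hlen, e1]; exact hi))
      rw [hfold, pvT_loop]

theorem sumOfBeauties_raises : Claim_raises_sumOfBeauties := by
  unfold Claim_raises_sumOfBeauties
  exact ⟨fun nums _ hr hp => hp hr, by decide⟩

-- self-check: the raise witness really lies inside Raises_ and B's port returns the stated literal there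
theorem pvRaisesWitness_ok : Raises_sumOfBeauties pvRaiseWitness_sumOfBeauties ∧
    sumOfBeauties_alt pvRaiseWitness_sumOfBeauties = pvRaiseWitnessOut_sumOfBeauties :=
  ⟨(sumOfBeauties_raises.2).2.1, (sumOfBeauties_raises.2).2.2⟩
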